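-- pv_equiv track=rewrite | github.com/hjmkt/AtCoder | ABC/abc007/d.py | count
-- ===== SOURCE A (Python) =====
-- def count(x):
--     fb, cb, t = -1, 0, x
--     while t>0:
--         if t%10==4 or t%10==9:
--             fb = cb
--         cb += 1
--         t //= 10
--     if fb>=0:
--         x = (x//(10**fb)-1) * (10**fb)
--         for i in range(fb):
--             x += 8*(10**i)
--     nb = 0
--     t = 1 if x%10!=4 and x%10!=9 else 0
--     while True:
--         b = x%10
--         for i in range(b):
--             if i!=4 and i!=9:
--                 t += 8**nb
--         x //= 10
--         nb += 1
--         if x==0: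
--             break
--     return t
-- ===== SOURCE B (Python) =====
-- def count(x):
--     # digit DP, MSB-to-LSB with early stop at the first forbidden digit
--     if x < 0:
--         return 0
--     ds = []
--     while x > 0:
--         ds.append(x % 10)
--         x //= 10
--     ds.reverse()  # most-significant first; empty for x == 0
--     total = 0
--     for idx, d in enumerate(ds):
--         total += (d - 1 if d > 4 else d) * 8 ** (len(ds) - 1 - idx)
--         if d == 4 or d == 9:
--             return total
--     return total + 1
-- ===== Notes on version B (the rewrite author's own statement) =====
-- stated objective: simpler
-- what changed: B is a single MSB-to-LSB digit-DP pass over x's digit list (counting allowed digits below each digit and stopping at the first forbidden digit), replacing A's two-phase scheme that first locates the most significant forbidden digit and rewrites x into the largest digit-wise allowed number below it before counting.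
-- outside the precondition, e.g. on count(-1): A does not finish within the time limit, B returns 0
import Mathlib
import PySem

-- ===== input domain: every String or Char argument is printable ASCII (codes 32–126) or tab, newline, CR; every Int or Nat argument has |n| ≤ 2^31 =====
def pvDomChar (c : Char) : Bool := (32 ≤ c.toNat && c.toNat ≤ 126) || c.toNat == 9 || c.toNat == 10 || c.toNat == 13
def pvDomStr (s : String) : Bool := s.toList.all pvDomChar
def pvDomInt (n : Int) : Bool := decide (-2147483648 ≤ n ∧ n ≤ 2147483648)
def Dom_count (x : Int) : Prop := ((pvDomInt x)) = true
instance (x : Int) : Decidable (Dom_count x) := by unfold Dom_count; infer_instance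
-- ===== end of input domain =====

-- B replaces A's "rewrite x below its first bad digit, then count" scheme by one
-- MSB-to-LSB digit-DP pass with an early stop; objective: simpler.

-- termination helper for the division loops (cited in decreasing_by)
theorem pvFloordivTen_lt (t : Int) (h : 0 < t) : (PySem.Int.floordiv t 10).toNat < t.toNat := by
  rw [PySem.Int.floordiv_eq_ediv_of_pos (by norm_num)]
  omega

-- ===== PORT A =====
-- first while loop: finds fb (position of most significant 4/9 digit) and cb (digit count)
def countLoop1 (t fb cb : Int) : Int × Int :=
  if h : 0 < t then
    countLoop1 (PySem.Int.floordiv t 10)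
      (if PySem.Int.mod t 10 = 4 ∨ PySem.Int.mod t 10 = 9 then cb else fb) (cb + 1)
  else (fb, cb)
termination_by t.toNat
decreasing_by exact pvFloordivTen_lt t h

-- second while loop (do-while over the digits of x); fuel only guards totality,
-- count supplies enough fuel for every x ≥ 0
def countLoop2 : Nat → Int → Nat → Int → Int
  | 0, _x, _nb, t => t
  | fuel + 1, x, nb, t =>
    let b := PySem.Int.mod x 10
    let t := (PySem.List.pyRange 0 b 1).foldl
      (fun acc i => if i ≠ 4 ∧ i ≠ 9 then acc + 8 ^ nb else acc) t
    let x' := PySem.Int.floordiv x 10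
    if x' = 0 then t else countLoop2 fuel x' (nb + 1) t

def count (x : Int) : Int :=
  let fb := (countLoop1 x (-1) 0).1
  let x1 :=
    if fb ≥ 0 then
      (PySem.List.pyRange 0 fb 1).foldl (fun acc i => acc + 8 * 10 ^ i.toNat)
        ((PySem.Int.floordiv x (10 ^ fb.toNat) - 1) * 10 ^ fb.toNat)
    else x
  let t0 : Int := if PySem.Int.mod x1 10 ≠ 4 ∧ PySem.Int.mod x1 10 ≠ 9 then 1 else 0
  countLoop2 (x1.toNat + 1) x1 0 t0

-- ===== PORT B =====
-- B's digit-extraction loop (least significant first)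
def altDigits (x : Int) : List Int :=
  if h : 0 < x then PySem.Int.mod x 10 :: altDigits (PySem.Int.floordiv x 10) else []
termination_by x.toNat
decreasing_by exact pvFloordivTen_lt x h

-- B's for loop over the reversed (MSB-first) digit list, with the early return
def altGo : List Int → Int → Int
  | [], total => total + 1
  | d :: rest, total =>
    let total := total + (if d > 4 then d - 1 else d) * 8 ^ rest.length
    if d = 4 ∨ d = 9 then total else altGo rest total

def count_alt (x : Int) : Int :=
  if x < 0 then 0 else altGo (altDigits x).reverse 0

-- ===== PRECONDITION & SPEC =====
-- A's final while-True loop never terminates for negative x (x//10 stays -1), so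
-- Pre_ admits exactly the nonnegative inputs, on all of which A returns.
def Pre_count (x : Int) : Prop := 0 ≤ x
instance (x : Int) : Decidable (Pre_count x) := by unfold Pre_count; infer_instance

def pvWitness_count : Int := 158

def Spec_count (x : Int) (out : Int) : Prop := out = count_alt x
instance (x : Int) (out : Int) : Decidable (Spec_count x out) := by unfold Spec_count; infer_instance

-- ===== CLAIM (what is proved, stated in full; the proofs are below) =====
def Claim_equal_count : Prop := ∀ (x : Int), Dom_count x → Pre_count x → Spec_count x (count x)

-- ===== LEMMAS AND PROOFS =====

-- number of allowed digits strictly below digit d (same expression B uses)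
def gb (d : Int) : Int := if d > 4 then d - 1 else d

-- value of an LSB-first digit list
def fromD : List Int → Int
  | [] => 0
  | d :: ds => d + 10 * fromD ds

-- weighted good-digit sum over an LSB-first digit list
def F : List Int → Int
  | [] => 0
  | d :: ds => gb d + 8 * F ds

-- weighted good-digit sum over an MSB-first list, weights offset by k
def Wo : List Int → Nat → Int
  | [], _ => 0
  | d :: r, k => gb d * 8 ^ (r.length + k) + Wo r k

-- index (LSB-first) of the most significant 4/9 digit, if any
def lastBad : List Int → Option Nat
  | [] => none
  | d :: ds =>
    match lastBad ds with
    | some j => some (j + 1)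
    | none => if d = 4 ∨ d = 9 then some 0 else none

theorem altDigits_pos {x : Int} (h : 0 < x) :
    altDigits x = PySem.Int.mod x 10 :: altDigits (PySem.Int.floordiv x 10) := by
  rw [altDigits]; simp [h]

theorem altDigits_nonpos {x : Int} (h : x ≤ 0) : altDigits x = [] := by
  rw [altDigits]; simp [Int.not_lt.mpr h]

theorem mod_ten_digit {x : Int} (h : 0 < x) :
    0 ≤ PySem.Int.mod x 10 ∧ PySem.Int.mod x 10 < 10 := by
  exact ⟨PySem.Int.mod_nonneg x (by norm_num), PySem.Int.mod_lt x (by norm_num)⟩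

theorem digits_mem : ∀ (x : Int), ∀ d ∈ altDigits x, 0 ≤ d ∧ d < 10 := by
  intro x
  induction x using altDigits.induct with
  | case1 x h ih =>
    rw [altDigits_pos h]
    intro d hd
    rcases List.mem_cons.mp hd with rfl | hm
    · exact mod_ten_digit h
    · exact ih d hm
  | case2 x h =>
    rw [altDigits_nonpos (by omega)]
    simp

theorem fromD_altDigits : ∀ (x : Int), 0 ≤ x → fromD (altDigits x) = x := by
  intro x
  induction x using altDigits.induct with
  | case1 x h ih =>
    intro _
    have hq : PySem.Int.floordiv x 10 = x / 10 :=
      PySem.Int.floordiv_eq_ediv_of_pos (by norm_num)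
    have hm : PySem.Int.mod x 10 = x % 10 :=
      PySem.Int.mod_eq_emod_of_pos (by norm_num : (0:Int) < 10)
    have hq0 : 0 ≤ PySem.Int.floordiv x 10 := by rw [hq]; omega
    rw [altDigits_pos h]
    simp only [fromD]
    rw [ih hq0, hq, hm]
    omega
  | case2 x h =>
    intro _
    rw [altDigits_nonpos (by omega)]
    simp only [fromD]
    omega

theorem len_altDigits_le : ∀ (x : Int), (altDigits x).length ≤ x.toNat := by
  intro x
  induction x using altDigits.induct with
  | case1 x h ih =>
    rw [altDigits_pos h]
    have := pvFloordivTen_lt x h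
    simp only [List.length_cons]
    omega
  | case2 x h =>
    rw [altDigits_nonpos (by omega)]
    simp

theorem getLast?_altDigits_ne_zero : ∀ (x : Int), (altDigits x).getLast? ≠ some 0 := by
  intro x
  induction x using altDigits.induct with
  | case1 x h ih =>
    rw [altDigits_pos h]
    rcases hrest : altDigits (PySem.Int.floordiv x 10) with _ | ⟨e, r⟩
    · have hq : PySem.Int.floordiv x 10 = x / 10 :=
        PySem.Int.floordiv_eq_ediv_of_pos (by norm_num)
      have hm : PySem.Int.mod x 10 = x % 10 :=
        PySem.Int.mod_eq_emod_of_pos (by norm_num : (0:Int) < 10)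
      have hz : ¬ 0 < PySem.Int.floordiv x 10 := by
        intro hc
        rw [altDigits_pos hc] at hrest
        simp at hrest
      rw [hq] at hz
      simp only [List.getLast?_singleton, hm, ne_eq, Option.some.injEq]
      omega
    · rw [List.getLast?_cons_cons, ← hrest]
      exact ih
  | case2 x h =>
    rw [altDigits_nonpos (by omega)]
    simp

theorem pvModTen {d m : Int} (h0 : 0 ≤ d) (h1 : d < 10) (h2 : 0 ≤ m) :
    PySem.Int.mod (d + 10 * m) 10 = d := by
  rw [PySem.Int.mod_eq_emod_of_pos (by norm_num : (0:Int) < 10)]; omega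

theorem pvDivTen {d m : Int} (h0 : 0 ≤ d) (h1 : d < 10) (h2 : 0 ≤ m) :
    PySem.Int.floordiv (d + 10 * m) 10 = m := by
  rw [PySem.Int.floordiv_eq_ediv_of_pos (by norm_num)]; omega

theorem fromD_nonneg : ∀ (ds : List Int), (∀ d ∈ ds, 0 ≤ d ∧ d < 10) → 0 ≤ fromD ds := by
  intro ds
  induction ds with
  | nil => intro _; simp [fromD]
  | cons d r ih =>
    intro h
    have h1 := (h d (by simp)).1
    have h2 := ih (fun e he => h e (by simp [he]))
    simp only [fromD]
    omega

theorem fromD_pos : ∀ (ds : List Int), (∀ d ∈ ds, 0 ≤ d ∧ d < 10) →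
    ds.getLast? ≠ some 0 → ds ≠ [] → 0 < fromD ds := by
  intro ds
  induction ds with
  | nil => intro _ _ h; exact absurd rfl h
  | cons d r ih =>
    intro hdig hlast _
    rcases r with _ | ⟨e, r'⟩
    · have : d ≠ 0 := by simpa using hlast
      have := (hdig d (by simp)).1
      simp only [fromD]
      omega
    · have hpos : 0 < fromD (e :: r') := by
        apply ih (fun x hx => hdig x (by simp at hx ⊢; tauto)) _ (by simp)
        simpa [List.getLast?_cons_cons] using hlast
      have := (hdig d (by simp)).1
      simp only [fromD] at hpos ⊢
      omega

theorem altDigits_fromD : ∀ (ds : List Int), (∀ d ∈ ds, 0 ≤ d ∧ d < 10) →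
    ds.getLast? ≠ some 0 → altDigits (fromD ds) = ds := by
  intro ds
  induction ds with
  | nil => intro _ _; exact altDigits_nonpos (by simp [fromD])
  | cons d r ih =>
    intro hdig hlast
    have hd := hdig d (by simp)
    have hr : ∀ e ∈ r, 0 ≤ e ∧ e < 10 := fun e he => hdig e (by simp [he])
    have hrn : 0 ≤ fromD r := fromD_nonneg r hr
    have hpos : 0 < fromD (d :: r) := fromD_pos _ hdig hlast (by simp)
    have hrl : r.getLast? ≠ some 0 := by
      rcases r with _ | ⟨e, r'⟩
      · simp
      · rwa [List.getLast?_cons_cons] at hlast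
    have hfd : fromD (d :: r) = d + 10 * fromD r := rfl
    rw [altDigits_pos hpos, hfd, pvModTen hd.1 hd.2 hrn, pvDivTen hd.1 hd.2 hrn, ih hr hrl]

theorem fromD_append (a b : List Int) :
    fromD (a ++ b) = fromD a + 10 ^ a.length * fromD b := by
  induction a with
  | nil => simp [fromD]
  | cons d r ih => simp [fromD, ih, pow_succ]; ring

theorem F_append (a b : List Int) : F (a ++ b) = F a + 8 ^ a.length * F b := by
  induction a with
  | nil => simp [F]
  | cons d r ih => simp [F, ih, pow_succ]; ring

theorem F_replicate (j : Nat) : F (List.replicate j 8) = 8 ^ j - 1 := by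
  induction j with
  | zero => simp [F]
  | succ n ih => rw [List.replicate_succ]; simp [F, ih, gb, pow_succ]; ring

theorem fromD_replicate_succ (j : Nat) :
    fromD (List.replicate (j + 1) 8) = fromD (List.replicate j 8) + 10 ^ j * 8 := by
  rw [List.replicate_succ' (n := j), fromD_append]
  simp [fromD]

-- the inner for-loop of A's second while loop
theorem innerSum (b : Int) (nb : Nat) (t : Int) (h0 : 0 ≤ b) (h1 : b < 10) :
    (PySem.List.pyRange 0 b 1).foldl
      (fun acc i => if i ≠ 4 ∧ i ≠ 9 then acc + 8 ^ nb else acc) t = t + gb b * 8 ^ nb := by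
  interval_cases b <;>
    norm_num [PySem.List.pyRange_one_cons, PySem.List.pyRange_one_eq_nil, gb] <;> ring

theorem countLoop2_spec : ∀ (fuel : Nat) (x : Int) (nb : Nat) (t : Int), 0 ≤ x →
    (altDigits x).length < fuel → countLoop2 fuel x nb t = t + 8 ^ nb * F (altDigits x) := by
  intro fuel
  induction fuel with
  | zero => intro x nb t _ h; exact absurd h (Nat.not_lt_zero _)
  | succ f ih =>
    intro x nb t hx hlen
    have hm0 : PySem.Int.mod 0 10 = 0 := by
      rw [PySem.Int.mod_eq_emod_of_pos (by norm_num : (0:Int) < 10)]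
      norm_num
    rcases lt_or_eq_of_le hx with hpos | hz
    · have hb := mod_ten_digit hpos
      have hq : PySem.Int.floordiv x 10 = x / 10 :=
        PySem.Int.floordiv_eq_ediv_of_pos (by norm_num)
      have hq0 : 0 ≤ PySem.Int.floordiv x 10 := by rw [hq]; omega
      simp only [countLoop2]
      rw [innerSum _ nb t hb.1 hb.2, altDigits_pos hpos]
      by_cases hz2 : PySem.Int.floordiv x 10 = 0
      · rw [if_pos hz2, hz2, altDigits_nonpos le_rfl]
        simp only [F]
        ring
      · rw [if_neg hz2]
        have hlen' : (altDigits (PySem.Int.floordiv x 10)).length < f := by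
          rw [altDigits_pos hpos] at hlen
          simpa using hlen
        rw [ih _ (nb + 1) _ hq0 hlen']
        simp only [F, pow_succ]
        ring
    · rw [← hz]
      simp only [countLoop2]
      rw [hm0, PySem.List.pyRange_one_eq_nil le_rfl, altDigits_nonpos le_rfl]
      have : PySem.Int.floordiv 0 10 = 0 := by
        rw [PySem.Int.floordiv_eq_ediv_of_pos (by norm_num)]
        norm_num
      rw [this]
      simp [F]

theorem countLoop1_spec : ∀ (x fb cb : Int), 0 ≤ x →
    countLoop1 x fb cb =
      ((match lastBad (altDigits x) with | none => fb | some j => cb + j),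
        cb + (altDigits x).length) := by
  intro x fb cb
  induction x, fb, cb using countLoop1.induct with
  | case1 t fb cb h ih =>
    intro _
    have hq : PySem.Int.floordiv t 10 = t / 10 :=
      PySem.Int.floordiv_eq_ediv_of_pos (by norm_num)
    have hq0 : 0 ≤ PySem.Int.floordiv t 10 := by rw [hq]; omega
    have ih' := ih hq0
    rw [countLoop1, dif_pos h, altDigits_pos h]
    simp only [lastBad, List.length_cons]
    by_cases hbad : PySem.Int.mod t 10 = 4 ∨ PySem.Int.mod t 10 = 9
    · rw [if_pos hbad, dif_pos hbad] at *
      rw [ih']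
      rcases hlb : lastBad (altDigits (PySem.Int.floordiv t 10)) with _ | j
      · simp only [hlb, if_pos hbad, Prod.mk.injEq]
        refine ⟨by push_cast; ring, by push_cast; ring⟩
      · simp only [hlb, Prod.mk.injEq]
        refine ⟨by push_cast; ring, by push_cast; ring⟩
    · rw [if_neg hbad, dif_neg hbad] at *
      rw [ih']
      rcases hlb : lastBad (altDigits (PySem.Int.floordiv t 10)) with _ | j
      · simp only [hlb, if_neg hbad, Prod.mk.injEq]
        refine ⟨trivial, by push_cast; ring⟩
      · simp only [hlb, Prod.mk.injEq]
        refine ⟨by push_cast; ring, by push_cast; ring⟩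
  | case2 t fb cb h =>
    intro ht
    have ht0 : t = 0 := by omega
    subst ht0
    rw [countLoop1, dif_neg h, altDigits_nonpos le_rfl]
    simp [lastBad]

theorem lastBad_none_iff (ds : List Int) :
    lastBad ds = none ↔ ∀ d ∈ ds, ¬(d = 4 ∨ d = 9) := by
  induction ds with
  | nil => simp [lastBad]
  | cons d r ih =>
    constructor
    · intro h
      simp only [lastBad] at h
      rcases hr : lastBad r with _ | j
      · rw [hr] at h
        by_cases hb : d = 4 ∨ d = 9
        · simp [hb] at h
        · intro e he
          rcases List.mem_cons.mp he with rfl | hm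
          · exact hb
          · exact (ih.mp hr) e hm
      · rw [hr] at h; simp at h
    · intro hall
      simp only [lastBad]
      rw [ih.mpr (fun e he => hall e (List.mem_cons_of_mem _ he))]
      rw [if_neg (hall d (by simp))]

theorem lastBad_some_split : ∀ (ds : List Int) (j : Nat), lastBad ds = some j →
    ∃ l d u, ds = l ++ d :: u ∧ l.length = j ∧ (d = 4 ∨ d = 9) ∧
      ∀ e ∈ u, ¬(e = 4 ∨ e = 9) := by
  intro ds
  induction ds with
  | nil => intro j h; simp [lastBad] at h
  | cons d r ih =>
    intro j h
    simp only [lastBad] at h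
    rcases hr : lastBad r with _ | j'
    · rw [hr] at h
      by_cases hb : d = 4 ∨ d = 9
      · simp [hb] at h
        exact ⟨[], d, r, by simp, by simp [← h], hb, (lastBad_none_iff r).mp hr⟩
      · simp [hb] at h
    · rw [hr] at h
      simp at h
      obtain ⟨l, e, u, hds, hl, he, hu⟩ := ih j' hr
      exact ⟨d :: l, e, u, by simp [hds], by simp [hl]; omega, he, hu⟩

theorem altGo_append_good : ∀ (m ms : List Int) (t : Int),
    (∀ d ∈ m, ¬(d = 4 ∨ d = 9)) →
    altGo (m ++ ms) t = altGo ms (t + Wo m ms.length) := by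
  intro m
  induction m with
  | nil => intro ms t _; simp [Wo]
  | cons d r ih =>
    intro ms t hgood
    have hd : ¬(d = 4 ∨ d = 9) := hgood d (by simp)
    simp only [List.cons_append, altGo, hd, if_false]
    rw [ih ms _ (fun e he => hgood e (by simp [he]))]
    congr 1
    simp [Wo, gb, List.length_append]
    ring

theorem Wo_append (a b : List Int) (k : Nat) :
    Wo (a ++ b) k = Wo a (b.length + k) + Wo b k := by
  induction a with
  | nil => simp [Wo]
  | cons d r ih =>
    simp only [List.cons_append, Wo, ih, List.length_append]
    ring_nf

theorem Wo_reverse : ∀ (v : List Int) (k : Nat), Wo v.reverse k = 8 ^ k * F v := by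
  intro v
  induction v with
  | nil => intro k; simp [Wo, F]
  | cons d r ih =>
    intro k
    rw [List.reverse_cons, Wo_append, ih]
    simp [Wo, F]
    ring

theorem eights_fold : ∀ (j : Nat) (v : Int),
    (PySem.List.pyRange 0 (j : Int) 1).foldl (fun acc i => acc + 8 * 10 ^ i.toNat) v =
      v + fromD (List.replicate j 8) := by
  intro j
  induction j with
  | zero => intro v; rw [PySem.List.pyRange_one_eq_nil (by norm_num)]; simp [fromD]
  | succ n ih =>
    intro v
    have hcast : ((n + 1 : Nat) : Int) = (n : Int) + 1 := by push_cast; ring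
    rw [hcast, PySem.List.pyRange_one_succ_right (by positivity), List.foldl_append, ih,
      fromD_replicate_succ]
    simp only [List.foldl_cons, List.foldl_nil, Int.toNat_natCast]
    ring

theorem floordiv_pow_ten : ∀ (j : Nat) (x : Int), 0 ≤ x →
    PySem.Int.floordiv x (10 ^ j) = fromD ((altDigits x).drop j) := by
  intro j
  induction j with
  | zero =>
    intro x hx
    rw [PySem.Int.floordiv_eq_ediv_of_pos (by norm_num)]
    simp [fromD_altDigits x hx]
  | succ n ih =>
    intro x hx
    rcases lt_or_eq_of_le hx with hpos | hz
    · have h10 : (0:Int) < 10 ^ (n + 1) := by positivity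
      have h10n : (0:Int) < 10 ^ n := by positivity
      have hq : PySem.Int.floordiv x 10 = x / 10 :=
        PySem.Int.floordiv_eq_ediv_of_pos (by norm_num)
      have hq0 : 0 ≤ PySem.Int.floordiv x 10 := by rw [hq]; omega
      rw [PySem.Int.floordiv_eq_ediv_of_pos h10, altDigits_pos hpos, List.drop_succ_cons,
        ← ih (PySem.Int.floordiv x 10) hq0, PySem.Int.floordiv_eq_ediv_of_pos h10n, hq,
        pow_succ, mul_comm ((10:Int)^n) 10, ← Int.ediv_ediv_of_nonneg (by norm_num : (0:Int) ≤ 10)]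
    · rw [← hz, altDigits_nonpos le_rfl]
      rw [PySem.Int.floordiv_eq_ediv_of_pos (by positivity)]
      simp [fromD]

-- ===== VERDICT (by name: the statement is the Claim_ definition above) =====
theorem count_spec : Claim_equal_count := by
  unfold Claim_equal_count
  intro x _ hx
  replace hx : 0 ≤ x := hx
  unfold Spec_count
  simp only [count, count_alt]
  rw [if_neg (by omega : ¬ x < 0)]
  rw [countLoop1_spec x (-1) 0 hx]
  have hmem := digits_mem x
  have hlast := getLast?_altDigits_ne_zero x
  rcases hlb : lastBad (altDigits x) with _ | j
  · -- no forbidden digit in x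
    simp only [hlb]
    rw [if_neg (by norm_num : ¬ ((-1:Int) ≥ 0))]
    have hgood : ∀ d ∈ altDigits x, ¬(d = 4 ∨ d = 9) := (lastBad_none_iff _).mp hlb
    have ht0 : (if PySem.Int.mod x 10 ≠ 4 ∧ PySem.Int.mod x 10 ≠ 9 then (1:Int) else 0) = 1 := by
      rcases lt_or_eq_of_le hx with hpos | hz
      · have hhead : PySem.Int.mod x 10 ∈ altDigits x := by rw [altDigits_pos hpos]; simp
        have := hgood _ hhead
        rw [if_pos (by tauto)]
      · have hm0 : PySem.Int.mod x 10 = 0 := by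
          rw [← hz, PySem.Int.mod_eq_emod_of_pos (by norm_num : (0:Int) < 10)]
          norm_num
        rw [hm0, if_pos (by norm_num)]
    rw [ht0]
    rw [countLoop2_spec (x.toNat + 1) x 0 1 hx (by have := len_altDigits_le x; omega)]
    have hrev : altGo (altDigits x).reverse 0 = 0 + Wo (altDigits x).reverse 0 + 1 := by
      have h := altGo_append_good (altDigits x).reverse [] 0
        (fun d hd => hgood d (List.mem_reverse.mp hd))
      simpa [altGo] using h
    rw [hrev, Wo_reverse]
    ring
  · -- most significant forbidden digit at LSB-index j
    obtain ⟨l, dj, u, hsplit, hlen, hbad, hgoodu⟩ := lastBad_some_split _ j hlb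
    simp only [hlb]
    rw [if_pos (by positivity : ((0:Int) + (j:Int)) ≥ 0)]
    have h0j : ((0:Int) + (j:Int)) = (j:Int) := by ring
    rw [h0j]
    simp only [Int.toNat_natCast]
    simp only [eights_fold, floordiv_pow_ten j x hx]
    have hdrop : (l ++ dj :: u).drop j = dj :: u := by rw [← hlen, List.drop_left]
    simp only [hsplit, hdrop]
    have hnew : (fromD (dj :: u) - 1) * 10 ^ j + fromD (List.replicate j 8) =
        fromD (List.replicate j 8 ++ (dj - 1) :: u) := by
      rw [fromD_append, List.length_replicate]
      simp only [fromD]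
      ring
    simp only [hnew]
    have hmem' : ∀ d ∈ dj :: u, 0 ≤ d ∧ d < 10 := by
      intro d hd
      exact hmem d (by rw [hsplit]; exact List.mem_append.mpr (Or.inr hd))
    have hdnew : ∀ d ∈ List.replicate j 8 ++ (dj - 1) :: u, 0 ≤ d ∧ d < 10 := by
      intro d hd
      rcases List.mem_append.mp hd with h8 | hc
      · rw [List.eq_of_mem_replicate h8]; norm_num
      · rcases List.mem_cons.mp hc with rfl | hu
        · rcases hbad with rfl | rfl <;> norm_num
        · exact hmem' d (by simp [hu])
    have hlastnew : (List.replicate j 8 ++ (dj - 1) :: u).getLast? ≠ some 0 := by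
      rw [List.getLast?_append_of_ne_nil _ (by simp)]
      rcases hu : u with _ | ⟨e, u'⟩
      · simp only [List.getLast?_singleton, ne_eq, Option.some.injEq]
        rcases hbad with rfl | rfl <;> norm_num
      · rw [List.getLast?_cons_cons]
        have : (l ++ dj :: u).getLast? = (e :: u').getLast? := by
          rw [List.getLast?_append_of_ne_nil _ (by simp), hu, List.getLast?_cons_cons]
        rw [← this, ← hsplit]
        exact hlast
    have hAD := altDigits_fromD _ hdnew hlastnew
    have hx1n : 0 ≤ fromD (List.replicate j 8 ++ (dj - 1) :: u) := fromD_nonneg _ hdnew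
    have ht0 : (if PySem.Int.mod (fromD (List.replicate j 8 ++ (dj - 1) :: u)) 10 ≠ 4 ∧
        PySem.Int.mod (fromD (List.replicate j 8 ++ (dj - 1) :: u)) 10 ≠ 9 then (1:Int) else 0)
        = 1 := by
      obtain ⟨h0, tl, hcons, hh4, hh9⟩ :
          ∃ h0 tl, List.replicate j 8 ++ (dj - 1) :: u = h0 :: tl ∧ h0 ≠ 4 ∧ h0 ≠ 9 := by
        cases j with
        | zero =>
          exact ⟨dj - 1, u, by simp, by rcases hbad with rfl | rfl <;> norm_num,
            by rcases hbad with rfl | rfl <;> norm_num⟩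
        | succ n =>
          exact ⟨8, List.replicate n 8 ++ (dj - 1) :: u, by simp [List.replicate_succ],
            by norm_num, by norm_num⟩
      have hd0 := hdnew h0 (by rw [hcons]; simp)
      have htl : 0 ≤ fromD tl :=
        fromD_nonneg tl (fun e he => hdnew e (by rw [hcons]; simp [he]))
      have hm : PySem.Int.mod (fromD (List.replicate j 8 ++ (dj - 1) :: u)) 10 = h0 := by
        rw [hcons]
        exact pvModTen hd0.1 hd0.2 htl
      rw [hm, if_pos ⟨hh4, hh9⟩]
    rw [ht0]
    rw [countLoop2_spec _ _ 0 1 hx1n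
      (by have := len_altDigits_le (fromD (List.replicate j 8 ++ (dj - 1) :: u)); omega)]
    rw [hAD]
    have hrev : (l ++ dj :: u).reverse = u.reverse ++ dj :: l.reverse := by simp
    rw [hrev]
    rw [altGo_append_good u.reverse (dj :: l.reverse) 0
      (fun d hd => hgoodu d (List.mem_reverse.mp hd))]
    have hgostep : ∀ t : Int, altGo (dj :: l.reverse) t = t + gb dj * 8 ^ l.reverse.length := by
      intro t
      simp only [altGo]
      rw [if_pos hbad]
      rfl
    rw [hgostep]
    simp only [List.length_cons, List.length_reverse, hlen]
    rw [Wo_reverse u (j + 1)]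
    rw [F_append, F_replicate, List.length_replicate]
    simp only [F]
    have hgb : gb (dj - 1) = gb dj - 1 := by rcases hbad with rfl | rfl <;> norm_num [gb]
    rw [hgb]
    ring
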